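-- pv_equiv track=rewrite | github.com/TgkCapture/welfare_system | app/services/excel_parser.py | _find_year_sheet
-- ===== SOURCE A (Python) =====
-- def _find_year_sheet(all_sheets, year):
--     """Find the appropriate sheet for the given year"""
--     possible_sheet_names = [
--         str(year),
--         f"{year} Data",
--         f"Data {year}",
--         f"Contributions {year}",
--         f"{year} Contributions",
--     ]
--
--     for sheet_name in all_sheets:
--         if str(year) in sheet_name:
--             return sheet_name
--
--     # Check for common patterns
--     for sheet_name in all_sheets:
--         sheet_lower = sheet_name.lower()
--         if any(pattern.lower() in sheet_lower for pattern in ['data', 'contributions']):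
--             return sheet_name
--
--     # Return first sheet if none found
--     if all_sheets:
--         return list(all_sheets.keys())[0]
--
--     return None
-- ===== SOURCE B (Python) =====
-- def _find_year_sheet(all_sheets, year):
--     """Single pass: return on a year match immediately; remember first 'data'/'contributions' sheet."""
--     ys = str(year)
--     candidate = None
--     for sheet_name in all_sheets:
--         if ys in sheet_name:
--             return sheet_name
--         if candidate is None:
--             sl = sheet_name.lower()
--             if 'data' in sl or 'contributions' in sl:
--                 candidate = sheet_name
--     if candidate is not None:
--         return candidate
--     if all_sheets:
--         return list(all_sheets.keys())[0]
--     return None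
-- ===== Notes on version B (the rewrite author's own statement) =====
-- stated objective: faster
-- what changed: Replaces A's two sequential full scans over the sheet names with one single pass that returns immediately on a year match while remembering the first 'data'/'contributions' candidate in an accumulator.
import Mathlib
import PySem

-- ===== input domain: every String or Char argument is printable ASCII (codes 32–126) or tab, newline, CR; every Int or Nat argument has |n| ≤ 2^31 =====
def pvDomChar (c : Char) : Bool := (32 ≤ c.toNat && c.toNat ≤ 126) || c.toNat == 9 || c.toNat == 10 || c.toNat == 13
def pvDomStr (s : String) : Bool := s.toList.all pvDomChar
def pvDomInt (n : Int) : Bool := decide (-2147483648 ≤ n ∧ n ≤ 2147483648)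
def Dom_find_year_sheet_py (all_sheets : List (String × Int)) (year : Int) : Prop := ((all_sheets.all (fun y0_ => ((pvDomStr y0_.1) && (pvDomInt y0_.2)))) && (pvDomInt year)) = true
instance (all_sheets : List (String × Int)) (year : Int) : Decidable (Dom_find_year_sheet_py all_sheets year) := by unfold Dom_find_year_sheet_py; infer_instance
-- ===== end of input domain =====

-- B merges A's two sequential scans of the sheet names into one pass with a candidate accumulator.
-- all_sheets is a Python dict; iteration is over its keys (PySem.Dict.ofList collapses duplicate keys as Python does).

-- ===== PORT A =====
-- 'data' in sheet_lower or 'contributions' in sheet_lower (pattern.lower() is the literal itself)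
def pvPattern (s : String) : Bool :=
  PySem.Str.isIn "data" (PySem.Str.lower s) || PySem.Str.isIn "contributions" (PySem.Str.lower s)

def find_year_sheet_py (all_sheets : List (String × Int)) (year : Int) : Option String :=
  -- first loop: return sheet_name if str(year) in sheet_name
  match ((PySem.Dict.ofList all_sheets).keys).find? (fun s => PySem.Str.isIn (PySem.Int.toStr year) s) with
  | some s => some s
  | none =>
    -- second loop: common patterns
    match ((PySem.Dict.ofList all_sheets).keys).find? pvPattern with
    | some s => some s
    | none =>
      -- return first sheet if none found, else None
      match (PySem.Dict.ofList all_sheets).keys with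
      | [] => none
      | k :: _ => some k

-- ===== PORT B =====
-- single pass: return immediately on a year match, record the first pattern candidate
def pvAltGo (ys : String) (keys : List String) (cand : Option String) : Option String :=
  match keys with
  | [] => cand
  | s :: rest =>
    if PySem.Str.isIn ys s then some s
    else pvAltGo ys rest (if cand.isNone && pvPattern s then some s else cand)

def find_year_sheet_py_alt (all_sheets : List (String × Int)) (year : Int) : Option String :=
  match pvAltGo (PySem.Int.toStr year) ((PySem.Dict.ofList all_sheets).keys) none with
  | some c => some c
  | none =>
    match (PySem.Dict.ofList all_sheets).keys with
    | [] => none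
    | k :: _ => some k

-- ===== PRECONDITION & SPEC =====
def Spec_find_year_sheet_py (all_sheets : List (String × Int)) (year : Int) (out : Option String) : Prop := out = find_year_sheet_py_alt all_sheets year
instance (all_sheets : List (String × Int)) (year : Int) (out : Option String) : Decidable (Spec_find_year_sheet_py all_sheets year out) := by unfold Spec_find_year_sheet_py; infer_instance

-- ===== CLAIM (what is proved, stated in full; the proofs are below) =====
def Claim_equal_find_year_sheet_py : Prop := ∀ (all_sheets : List (String × Int)) (year : Int), Dom_find_year_sheet_py all_sheets year → Spec_find_year_sheet_py all_sheets year (find_year_sheet_py all_sheets year)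

-- ===== LEMMAS AND PROOFS =====
-- characterisation of the one-pass loop in terms of the two sequential scans
theorem pvAltGo_eq (ys : String) (keys : List String) (cand : Option String) :
    pvAltGo ys keys cand =
      match keys.find? (fun s => PySem.Str.isIn ys s) with
      | some s => some s
      | none =>
        match cand with
        | some c => some c
        | none => keys.find? pvPattern := by
  induction keys generalizing cand with
  | nil => cases cand <;> simp [pvAltGo]
  | cons s rest ih =>
    simp only [pvAltGo, List.find?, PySem.Str.isIn]
    by_cases h : PySem.Chars.isIn ys.toList s.toList
    · simp [h]
    · simp only [h, Bool.false_eq_true, if_false, ih, PySem.Str.isIn]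
      cases cand with
      | some c => simp
      | none =>
        by_cases hp : pvPattern s <;> simp [hp]

-- ===== VERDICT (by name: the statement is the Claim_ definition above) =====
theorem find_year_sheet_py_spec : Claim_equal_find_year_sheet_py := by
  intro all_sheets year _
  unfold Spec_find_year_sheet_py find_year_sheet_py find_year_sheet_py_alt
  rw [pvAltGo_eq]
  cases h1 : ((PySem.Dict.ofList all_sheets).keys).find? (fun s => PySem.Str.isIn (PySem.Int.toStr year) s) <;>
    cases h2 : ((PySem.Dict.ofList all_sheets).keys).find? pvPattern <;> simp
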